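-- pv_equiv track=rewrite | github.com/ervin-macic/leetcode-for-fun | 1878. Get Biggest Three Rhombus Sums in a Grid/1878. Get Biggest Three Rhombus Sums in a Grid.py | _build_diagonal_prefix
-- ===== SOURCE A (Python) =====
-- def _build_diagonal_prefix(grid):
--     rows, cols = len(grid), len(grid[0])
--
--     diag_left = [[0] * (cols + 2) for _ in range(rows + 1)]
--     diag_right = [[0] * (cols + 2) for _ in range(rows + 1)]
--
--     for r in range(1, rows + 1):
--         for c in range(1, cols + 1):
--             val = grid[r - 1][c - 1]
--             diag_left[r][c] = diag_left[r - 1][c - 1] + val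
--             diag_right[r][c] = diag_right[r - 1][c + 1] + val
--
--     return diag_left, diag_right
-- ===== SOURCE B (Python) =====
-- def _build_diagonal_prefix(grid):
--     rows, cols = len(grid), len(grid[0])
--
--     def dl(r, c):
--         if r == 0 or c == 0 or c > cols:
--             return 0
--         return sum(grid[r - 1 - k][c - 1 - k] for k in range(min(r, c)))
--
--     def dr(r, c):
--         if r == 0 or c == 0 or c > cols:
--             return 0
--         return sum(grid[r - 1 - k][c - 1 + k] for k in range(min(r, cols + 1 - c)))
--
--     diag_left = [[dl(r, c) for c in range(cols + 2)] for r in range(rows + 1)]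
--     diag_right = [[dr(r, c) for c in range(cols + 2)] for r in range(rows + 1)]
--
--     return diag_left, diag_right
-- ===== Notes on version B (the rewrite author's own statement) =====
-- stated objective: alternative
-- what changed: A fills two preallocated padded tables in place with the DP recurrence table[r][c] = table[r-1][c-+1] + val; B has no tables-in-progress and no recurrence: it computes every entry independently as an explicit closed-form sum of the grid values along that entry's diagonal.
import Mathlib
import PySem

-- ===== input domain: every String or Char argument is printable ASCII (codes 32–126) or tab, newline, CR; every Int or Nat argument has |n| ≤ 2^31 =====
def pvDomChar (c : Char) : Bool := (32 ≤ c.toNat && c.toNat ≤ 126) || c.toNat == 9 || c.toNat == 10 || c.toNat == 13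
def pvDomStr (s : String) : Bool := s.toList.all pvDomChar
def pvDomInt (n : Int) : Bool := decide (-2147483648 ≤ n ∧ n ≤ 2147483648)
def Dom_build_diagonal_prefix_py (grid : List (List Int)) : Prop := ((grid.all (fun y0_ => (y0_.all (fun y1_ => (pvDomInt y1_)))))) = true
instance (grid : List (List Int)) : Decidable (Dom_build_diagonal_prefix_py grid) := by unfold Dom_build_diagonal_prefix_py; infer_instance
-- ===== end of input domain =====

-- A fills padded tables in place with the DP recurrence table[r][c] = table[r-1][c∓1] + val;
-- B computes every entry independently as a closed-form sum along its diagonal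
-- (objective: alternative algorithm; not faster).

-- ===== PORT A =====
-- cell read/write on a list-of-lists table (all accesses are in range under Pre_)
def pvGetCell (t : List (List Int)) (r c : Nat) : Int := (t.getD r []).getD c 0
def pvSetCell (t : List (List Int)) (r c : Nat) (v : Int) : List (List Int) :=
  t.set r ((t.getD r []).set c v)

-- body of A's inner loop (one (r, c) iteration)
def pvStepA (grid : List (List Int)) (r : Nat) (st : List (List Int) × List (List Int)) (c : Nat) :
    List (List Int) × List (List Int) :=
  let val := (grid.getD (r - 1) []).getD (c - 1) 0
  (pvSetCell st.1 r c (pvGetCell st.1 (r - 1) (c - 1) + val),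
   pvSetCell st.2 r c (pvGetCell st.2 (r - 1) (c + 1) + val))

def build_diagonal_prefix_py (grid : List (List Int)) : List (List Int) × List (List Int) :=
  let rows := grid.length
  let cols := grid.headI.length   -- len(grid[0]); Pre_ requires grid ≠ []
  let diag0 := List.replicate (rows + 1) (List.replicate (cols + 2) (0 : Int))
  (List.range' 1 rows).foldl
    (fun st r => (List.range' 1 cols).foldl (pvStepA grid r) st)
    (diag0, diag0)

-- ===== PORT B =====
-- Source B's helper dl(r, c): the closed-form sum along the ↘ diagonal ending at (r, c)
def pvDLb (grid : List (List Int)) (cols r c : Nat) : Int :=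
  if r = 0 ∨ c = 0 ∨ cols < c then 0
  else ((List.range (min r c)).map
    (fun k => (grid.getD (r - 1 - k) []).getD (c - 1 - k) 0)).sum

-- Source B's helper dr(r, c): the closed-form sum along the ↙ diagonal ending at (r, c)
def pvDRb (grid : List (List Int)) (cols r c : Nat) : Int :=
  if r = 0 ∨ c = 0 ∨ cols < c then 0
  else ((List.range (min r (cols + 1 - c))).map
    (fun k => (grid.getD (r - 1 - k) []).getD (c - 1 + k) 0)).sum

def build_diagonal_prefix_py_alt (grid : List (List Int)) : List (List Int) × List (List Int) :=
  let rows := grid.length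
  let cols := grid.headI.length
  ((List.range (rows + 1)).map (fun r => (List.range (cols + 2)).map (fun c => pvDLb grid cols r c)),
   (List.range (rows + 1)).map (fun r => (List.range (cols + 2)).map (fun c => pvDRb grid cols r c)))

-- ===== PRECONDITION & SPEC =====
-- Exactly the inputs on which the Python A returns: a nonempty grid each of whose rows
-- has at least len(grid[0]) entries (otherwise A raises IndexError).
def Pre_build_diagonal_prefix_py (grid : List (List Int)) : Prop :=
  grid ≠ [] ∧ ∀ row ∈ grid, grid.headI.length ≤ row.length
instance (grid : List (List Int)) : Decidable (Pre_build_diagonal_prefix_py grid) := by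
  unfold Pre_build_diagonal_prefix_py; infer_instance

def pvWitness_build_diagonal_prefix_py : List (List Int) := [[1, 2], [3, 4]]

def Spec_build_diagonal_prefix_py (grid : List (List Int)) (out : List (List Int) × List (List Int)) : Prop := out = build_diagonal_prefix_py_alt grid
instance (grid : List (List Int)) (out : List (List Int) × List (List Int)) : Decidable (Spec_build_diagonal_prefix_py grid out) := by unfold Spec_build_diagonal_prefix_py; infer_instance

-- ===== CLAIM (what is proved, stated in full; the proofs are below) =====
def Claim_equal_build_diagonal_prefix_py : Prop := ∀ (grid : List (List Int)), Dom_build_diagonal_prefix_py grid → Pre_build_diagonal_prefix_py grid → Spec_build_diagonal_prefix_py grid (build_diagonal_prefix_py grid)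

-- ===== LEMMAS AND PROOFS =====

-- the all-zero padded row
def pvZ (C : Nat) : List Int := List.replicate (C + 2) (0 : Int)

-- the functional row transformers that A's in-place fill is shown to realise
def pvRowL (cols : Nat) (prev row : List Int) : List Int :=
  0 :: (List.zipWith (· + ·) prev (row.take cols) ++ [0])
def pvRowR (cols : Nat) (prev row : List Int) : List Int :=
  0 :: (List.zipWith (· + ·) (prev.drop 2) (row.take cols) ++ [0])

-- partially filled new row after the first j cells of A's inner loop are written
def pvPart (X : List Int) (C j : Nat) : List Int :=
  X.take (j + 1) ++ List.replicate (C + 1 - j) (0 : Int)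

theorem scanl_getD_last {α β : Type} (f : β → α → β) :
    ∀ (l : List α) (b d : β), (List.scanl f b l).getD l.length d = l.foldl f b := by
  intro l
  induction l with
  | nil => intro b d; simp [List.scanl]
  | cons a t ih => intro b d; simp [List.scanl_cons]

theorem scanl_append_singleton {α β : Type} (f : β → α → β) :
    ∀ (l : List α) (b : β) (a : α),
      List.scanl f b (l ++ [a]) = List.scanl f b l ++ [f (l.foldl f b) a] := by
  intro l
  induction l with
  | nil => intro b a; simp [List.scanl]
  | cons x t ih => intro b a; simp [List.scanl_cons, ih]

theorem pvPart_zero_L (C : Nat) (p a : List Int) :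
    pvPart (pvRowL C p a) C 0 = pvZ C := by
  simp [pvPart, pvRowL, pvZ, List.replicate_succ]

theorem pvPart_zero_R (C : Nat) (p a : List Int) :
    pvPart (pvRowR C p a) C 0 = pvZ C := by
  simp [pvPart, pvRowR, pvZ, List.replicate_succ]

theorem pvPart_full (C : Nat) (Z : List Int) (hZ : Z.length = C) :
    pvPart (0 :: (Z ++ [0])) C C = 0 :: (Z ++ [0]) := by
  have h1 : C + 1 - C = 1 := by omega
  have h2 : List.take C (Z ++ [(0 : Int)]) = Z := List.take_left' hZ
  simp [pvPart, h1, List.take_succ_cons, h2]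

theorem rowset_eq (C j : Nat) (X : List Int) (hX : X.length = C + 2) (hj : j < C) :
    (pvPart X C j).set (1 + j) (X.getD (j + 1) 0) = pvPart X C (j + 1) := by
  have htlen : (X.take (j + 1)).length = j + 1 := by simp [List.length_take]; omega
  have hrep : C + 1 - j = (C - j) + 1 := by omega
  rw [pvPart, List.set_append, if_neg (by omega), htlen, hrep, List.replicate_succ]
  have h0 : 1 + j - (j + 1) = 0 := by omega
  rw [h0, List.set_cons_zero]
  have hg : X.getD (j + 1) 0 = X[j + 1]'(by omega) := List.getD_eq_getElem X 0 (by omega)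
  rw [pvPart, hg, show C + 1 - (j + 1) = C - j by omega,
    ← List.take_append_getElem (show j + 1 < X.length by omega)]
  simp only [List.append_assoc, List.singleton_append]

-- one application of A's inner body on the partially written tables
theorem stepA_eq (grid : List (List Int)) (C k j : Nat) (rowk PL PR : List Int)
    (S S' T T' : List (List Int)) (hj : j < C)
    (hrowk : C ≤ rowk.length) (hPL : PL.length = C + 2) (hPR : PR.length = C + 2)
    (hS : S.length = k + 1) (hS' : S'.length = k + 1)
    (hlS : S.getD k [] = PL) (hlS' : S'.getD k [] = PR)
    (hg : grid.getD k [] = rowk) :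
    pvStepA grid (k + 1)
      (S ++ pvPart (pvRowL C PL rowk) C j :: T, S' ++ pvPart (pvRowR C PR rowk) C j :: T') (1 + j)
    = (S ++ pvPart (pvRowL C PL rowk) C (j + 1) :: T,
       S' ++ pvPart (pvRowR C PR rowk) C (j + 1) :: T') := by
  have hkm : k < S.length := by omega
  have hkm' : k < S'.length := by omega
  have hZL : (List.zipWith (· + · : Int → Int → Int) PL (rowk.take C)).length = C := by
    simp [List.length_zipWith, hPL]; omega
  have hZR : (List.zipWith (· + · : Int → Int → Int) (PR.drop 2) (rowk.take C)).length = C := by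
    simp [List.length_zipWith, hPR]; omega
  have hXL : (pvRowL C PL rowk).length = C + 2 := by simp [pvRowL, hZL]
  have hXR : (pvRowR C PR rowk).length = C + 2 := by simp [pvRowR, hZR]
  -- values written
  have hvL : PL.getD j 0 + rowk.getD j 0 = (pvRowL C PL rowk).getD (j + 1) 0 := by
    rw [pvRowL, List.getD_cons_succ, List.getD_append _ _ _ j (by omega),
      List.getD_eq_getElem (List.zipWith (· + ·) PL (rowk.take C)) 0 (by omega),
      List.getElem_zipWith, List.getD_eq_getElem PL 0 (by omega),
      List.getD_eq_getElem rowk 0 (by omega), List.getElem_take]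
  have hvR : PR.getD (j + 2) 0 + rowk.getD j 0 = (pvRowR C PR rowk).getD (j + 1) 0 := by
    rw [pvRowR, List.getD_cons_succ, List.getD_append _ _ _ j (by omega),
      List.getD_eq_getElem (List.zipWith (· + ·) (PR.drop 2) (rowk.take C)) 0 (by omega),
      List.getElem_zipWith, List.getD_eq_getElem PR 0 (by omega),
      List.getD_eq_getElem rowk 0 (by omega), List.getElem_take, List.getElem_drop]
    congr 2
    omega
  -- table-level facts
  have hreadL : (S ++ pvPart (pvRowL C PL rowk) C j :: T).getD k [] = PL := by
    rw [List.getD_append _ _ _ k hkm]; exact hlS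
  have hreadR : (S' ++ pvPart (pvRowR C PR rowk) C j :: T').getD k [] = PR := by
    rw [List.getD_append _ _ _ k hkm']; exact hlS'
  have hrowAtL : (S ++ pvPart (pvRowL C PL rowk) C j :: T).getD (k + 1) []
      = pvPart (pvRowL C PL rowk) C j := by
    rw [List.getD_append_right _ _ _ _ (by omega)]; simp [hS]
  have hrowAtR : (S' ++ pvPart (pvRowR C PR rowk) C j :: T').getD (k + 1) []
      = pvPart (pvRowR C PR rowk) C j := by
    rw [List.getD_append_right _ _ _ _ (by omega)]; simp [hS']
  have hsetL : ∀ X : List Int,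
      (S ++ pvPart (pvRowL C PL rowk) C j :: T).set (k + 1) X = S ++ X :: T := by
    intro X; rw [List.set_append, if_neg (by omega), show k + 1 - S.length = 0 by omega,
      List.set_cons_zero]
  have hsetR : ∀ X : List Int,
      (S' ++ pvPart (pvRowR C PR rowk) C j :: T').set (k + 1) X = S' ++ X :: T' := by
    intro X; rw [List.set_append, if_neg (by omega), show k + 1 - S'.length = 0 by omega,
      List.set_cons_zero]
  simp only [pvStepA, pvGetCell, pvSetCell, show k + 1 - 1 = k by omega,
    show 1 + j - 1 = j by omega, show 1 + j + 1 = j + 2 by omega, hg]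
  rw [Prod.mk.injEq]
  constructor
  · rw [hrowAtL, hreadL, hsetL, hvL, rowset_eq C j _ hXL hj]
  · rw [hrowAtR, hreadR, hsetR, hvR, rowset_eq C j _ hXR hj]

-- A's inner loop fills the new row cell by cell
theorem inner_inv (grid : List (List Int)) (C k : Nat) (rowk PL PR : List Int)
    (S S' T T' : List (List Int))
    (hrowk : C ≤ rowk.length) (hPL : PL.length = C + 2) (hPR : PR.length = C + 2)
    (hS : S.length = k + 1) (hS' : S'.length = k + 1)
    (hlS : S.getD k [] = PL) (hlS' : S'.getD k [] = PR)
    (hg : grid.getD k [] = rowk) :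
    ∀ j, j ≤ C →
      (List.range' 1 j).foldl (pvStepA grid (k + 1))
        (S ++ pvPart (pvRowL C PL rowk) C 0 :: T, S' ++ pvPart (pvRowR C PR rowk) C 0 :: T')
      = (S ++ pvPart (pvRowL C PL rowk) C j :: T, S' ++ pvPart (pvRowR C PR rowk) C j :: T') := by
  intro j
  induction j with
  | zero => intro _; simp
  | succ j ih =>
    intro hj
    rw [List.range'_concat, List.foldl_append, ih (by omega)]
    simp only [List.foldl_cons, List.foldl_nil]
    rw [show 1 + 1 * j = 1 + j by omega]
    exact stepA_eq grid C k j rowk PL PR S S' T T' (by omega) hrowk hPL hPR hS hS' hlS hlS' hg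

-- row lengths are preserved by the functional transformers
theorem len_foldL (C : Nat) :
    ∀ (l : List (List Int)) (p : List Int), (∀ row ∈ l, C ≤ row.length) →
      p.length = C + 2 → (l.foldl (pvRowL C) p).length = C + 2 := by
  intro l
  induction l with
  | nil => intro p _ hp; simpa using hp
  | cons a t ih =>
    intro p hr hp
    simp only [List.foldl_cons]
    refine ih _ (fun row h => hr row (List.mem_cons_of_mem _ h)) ?_
    have := hr a List.mem_cons_self
    simp [pvRowL, List.length_zipWith, hp]; omega

theorem len_foldR (C : Nat) :
    ∀ (l : List (List Int)) (p : List Int), (∀ row ∈ l, C ≤ row.length) →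
      p.length = C + 2 → (l.foldl (pvRowR C) p).length = C + 2 := by
  intro l
  induction l with
  | nil => intro p _ hp; simpa using hp
  | cons a t ih =>
    intro p hr hp
    simp only [List.foldl_cons]
    refine ih _ (fun row h => hr row (List.mem_cons_of_mem _ h)) ?_
    have := hr a List.mem_cons_self
    simp [pvRowR, List.length_zipWith, hp]; omega

-- A's outer loop produces the scanl rows followed by still-zero rows
theorem outer_inv (grid : List (List Int))
    (hrow : ∀ row ∈ grid, grid.headI.length ≤ row.length) :
    ∀ k, k ≤ grid.length →
      (List.range' 1 k).foldl
        (fun st r => (List.range' 1 grid.headI.length).foldl (pvStepA grid r) st)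
        (List.replicate (grid.length + 1) (pvZ grid.headI.length),
         List.replicate (grid.length + 1) (pvZ grid.headI.length))
      = (List.scanl (pvRowL grid.headI.length) (pvZ grid.headI.length) (grid.take k)
           ++ List.replicate (grid.length - k) (pvZ grid.headI.length),
         List.scanl (pvRowR grid.headI.length) (pvZ grid.headI.length) (grid.take k)
           ++ List.replicate (grid.length - k) (pvZ grid.headI.length)) := by
  intro k
  induction k with
  | zero => simp [List.scanl, List.replicate_succ]
  | succ k ih =>
    intro hk
    rw [List.range'_concat, List.foldl_append, ih (by omega)]
    simp only [List.foldl_cons, List.foldl_nil]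
    rw [show 1 + 1 * k = k + 1 by omega]
    have hkc : k < grid.length := by omega
    have htk : (grid.take k).length = k := by simp [List.length_take]; omega
    have hmem : ∀ row ∈ grid.take k, grid.headI.length ≤ row.length :=
      fun row h => hrow row (List.take_subset _ _ h)
    have hrowk : grid.headI.length ≤ (grid.getD k []).length := by
      rw [List.getD_eq_getElem _ _ hkc]; exact hrow _ (List.getElem_mem hkc)
    have hPL : ((grid.take k).foldl (pvRowL grid.headI.length) (pvZ grid.headI.length)).length
        = grid.headI.length + 2 := len_foldL _ _ _ hmem (by simp [pvZ])
    have hPR : ((grid.take k).foldl (pvRowR grid.headI.length) (pvZ grid.headI.length)).length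
        = grid.headI.length + 2 := len_foldR _ _ _ hmem (by simp [pvZ])
    have hS : (List.scanl (pvRowL grid.headI.length) (pvZ grid.headI.length) (grid.take k)).length
        = k + 1 := by simp [List.length_scanl, htk]
    have hS' : (List.scanl (pvRowR grid.headI.length) (pvZ grid.headI.length) (grid.take k)).length
        = k + 1 := by simp [List.length_scanl, htk]
    have hlS : (List.scanl (pvRowL grid.headI.length) (pvZ grid.headI.length) (grid.take k)).getD k []
        = (grid.take k).foldl (pvRowL grid.headI.length) (pvZ grid.headI.length) := by
      have h := scanl_getD_last (pvRowL grid.headI.length) (grid.take k) (pvZ grid.headI.length) []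
      rwa [htk] at h
    have hlS' : (List.scanl (pvRowR grid.headI.length) (pvZ grid.headI.length) (grid.take k)).getD k []
        = (grid.take k).foldl (pvRowR grid.headI.length) (pvZ grid.headI.length) := by
      have h := scanl_getD_last (pvRowR grid.headI.length) (grid.take k) (pvZ grid.headI.length) []
      rwa [htk] at h
    have hinner := inner_inv grid grid.headI.length k (grid.getD k [])
      ((grid.take k).foldl (pvRowL grid.headI.length) (pvZ grid.headI.length))
      ((grid.take k).foldl (pvRowR grid.headI.length) (pvZ grid.headI.length))
      (List.scanl (pvRowL grid.headI.length) (pvZ grid.headI.length) (grid.take k))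
      (List.scanl (pvRowR grid.headI.length) (pvZ grid.headI.length) (grid.take k))
      (List.replicate (grid.length - (k + 1)) (pvZ grid.headI.length))
      (List.replicate (grid.length - (k + 1)) (pvZ grid.headI.length))
      hrowk hPL hPR hS hS' hlS hlS' rfl grid.headI.length le_rfl
    rw [pvPart_zero_L, pvPart_zero_R] at hinner
    rw [show grid.length - k = (grid.length - (k + 1)) + 1 by omega, List.replicate_succ, hinner]
    have hfullL : pvPart (pvRowL grid.headI.length
          ((grid.take k).foldl (pvRowL grid.headI.length) (pvZ grid.headI.length)) (grid.getD k []))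
          grid.headI.length grid.headI.length
        = pvRowL grid.headI.length
          ((grid.take k).foldl (pvRowL grid.headI.length) (pvZ grid.headI.length)) (grid.getD k []) := by
      have hZ : (List.zipWith (· + · : Int → Int → Int)
          ((grid.take k).foldl (pvRowL grid.headI.length) (pvZ grid.headI.length))
          ((grid.getD k []).take grid.headI.length)).length = grid.headI.length := by
        simp only [List.length_zipWith, List.length_take, hPL]; omega
      simpa [pvRowL] using pvPart_full grid.headI.length _ hZ
    have hfullR : pvPart (pvRowR grid.headI.length
          ((grid.take k).foldl (pvRowR grid.headI.length) (pvZ grid.headI.length)) (grid.getD k []))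
          grid.headI.length grid.headI.length
        = pvRowR grid.headI.length
          ((grid.take k).foldl (pvRowR grid.headI.length) (pvZ grid.headI.length)) (grid.getD k []) := by
      have hZ : (List.zipWith (· + · : Int → Int → Int)
          (((grid.take k).foldl (pvRowR grid.headI.length) (pvZ grid.headI.length)).drop 2)
          ((grid.getD k []).take grid.headI.length)).length = grid.headI.length := by
        simp only [List.length_zipWith, List.length_drop, List.length_take, hPR]; omega
      simpa [pvRowR] using pvPart_full grid.headI.length _ hZ
    rw [hfullL, hfullR]
    have htake : grid.take (k + 1) = grid.take k ++ [grid[k]'hkc] :=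
      (List.take_append_getElem hkc).symm
    have hscL : List.scanl (pvRowL grid.headI.length) (pvZ grid.headI.length) (grid.take (k + 1))
        = List.scanl (pvRowL grid.headI.length) (pvZ grid.headI.length) (grid.take k)
          ++ [pvRowL grid.headI.length
              ((grid.take k).foldl (pvRowL grid.headI.length) (pvZ grid.headI.length)) (grid.getD k [])] := by
      rw [htake, scanl_append_singleton, List.getD_eq_getElem _ _ hkc]
    have hscR : List.scanl (pvRowR grid.headI.length) (pvZ grid.headI.length) (grid.take (k + 1))
        = List.scanl (pvRowR grid.headI.length) (pvZ grid.headI.length) (grid.take k)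
          ++ [pvRowR grid.headI.length
              ((grid.take k).foldl (pvRowR grid.headI.length) (pvZ grid.headI.length)) (grid.getD k [])] := by
      rw [htake, scanl_append_singleton, List.getD_eq_getElem _ _ hkc]
    rw [hscL, hscR]
    simp [List.append_assoc]

-- ===== B-side: the closed forms satisfy A's recurrences =====

theorem recL (grid : List (List Int)) (cols k j : Nat) (hj : j < cols) :
    pvDLb grid cols (k + 1) (j + 1) = pvDLb grid cols k j + (grid.getD k []).getD j 0 := by
  rcases Nat.eq_zero_or_pos j with hj0 | hjp
  · subst hj0
    have h1 : pvDLb grid cols k 0 = 0 := by simp [pvDLb]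
    have hmin : min (k + 1) 1 = 1 := by omega
    rw [pvDLb, if_neg (by omega : ¬ (k + 1 = 0 ∨ 0 + 1 = 0 ∨ cols < 0 + 1)), hmin, h1]
    simp [List.range_one]
  rcases Nat.eq_zero_or_pos k with hk0 | hkp
  · subst hk0
    have h1 : pvDLb grid cols 0 j = 0 := by simp [pvDLb]
    have hmin : min (0 + 1) (j + 1) = 1 := by omega
    rw [pvDLb, if_neg (by omega : ¬ (0 + 1 = 0 ∨ j + 1 = 0 ∨ cols < j + 1)), hmin, h1]
    simp [List.range_one]
  · have hmin : min (k + 1) (j + 1) = min k j + 1 := by omega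
    simp only [pvDLb, if_neg (by omega : ¬ (k + 1 = 0 ∨ j + 1 = 0 ∨ cols < j + 1)),
      if_neg (by omega : ¬ (k = 0 ∨ j = 0 ∨ cols < j)), hmin,
      List.range_succ_eq_map, List.map_cons, List.map_map, List.sum_cons]
    rw [show k + 1 - 1 - 0 = k by omega, show j + 1 - 1 - 0 = j by omega, Int.add_comm]
    congr 1
    refine congrArg List.sum (List.map_congr_left fun i hi => ?_)
    have hi' : i < min k j := List.mem_range.mp hi
    have e1 : k + 1 - 1 - (i + 1) = k - 1 - i := by omega
    have e2 : j + 1 - 1 - (i + 1) = j - 1 - i := by omega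
    simp only [Function.comp_apply, Nat.succ_eq_add_one, e1, e2]

theorem recR (grid : List (List Int)) (cols k j : Nat) (hj : j < cols) :
    pvDRb grid cols (k + 1) (j + 1) = pvDRb grid cols k (j + 2) + (grid.getD k []).getD j 0 := by
  by_cases hedge : k = 0 ∨ cols < j + 2
  · have h0 : pvDRb grid cols k (j + 2) = 0 := by
      rcases hedge with h | h <;> simp [pvDRb, h]
    have hmin : min (k + 1) (cols + 1 - (j + 1)) = 1 := by rcases hedge with h | h <;> omega
    rw [pvDRb, if_neg (by omega : ¬ (k + 1 = 0 ∨ j + 1 = 0 ∨ cols < j + 1)), hmin, h0]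
    simp [List.range_one]
  · have hmin : min (k + 1) (cols + 1 - (j + 1)) = min k (cols + 1 - (j + 2)) + 1 := by omega
    simp only [pvDRb, if_neg (by omega : ¬ (k + 1 = 0 ∨ j + 1 = 0 ∨ cols < j + 1)),
      if_neg (by omega : ¬ (k = 0 ∨ j + 2 = 0 ∨ cols < j + 2)), hmin,
      List.range_succ_eq_map, List.map_cons, List.map_map, List.sum_cons]
    rw [show k + 1 - 1 - 0 = k by omega, show j + 1 - 1 + 0 = j by omega, Int.add_comm]
    congr 1
    refine congrArg List.sum (List.map_congr_left fun i hi => ?_)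
    have hi' : i < min k (cols + 1 - (j + 2)) := List.mem_range.mp hi
    have e1 : k + 1 - 1 - (i + 1) = k - 1 - i := by omega
    have e2 : j + 1 - 1 + (i + 1) = j + 2 - 1 + i := by omega
    simp only [Function.comp_apply, Nat.succ_eq_add_one, e1, e2]

-- row 0 of the closed form is the zero row
theorem closed_row_zero_L (grid : List (List Int)) (cols : Nat) :
    (List.range (cols + 2)).map (fun c => pvDLb grid cols 0 c) = pvZ cols := by
  have h : ∀ c ∈ List.range (cols + 2), pvDLb grid cols 0 c = (fun _ => (0 : Int)) c :=
    fun c _ => by simp [pvDLb]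
  rw [List.map_congr_left h]
  simp [pvZ, List.map_const']

theorem closed_row_zero_R (grid : List (List Int)) (cols : Nat) :
    (List.range (cols + 2)).map (fun c => pvDRb grid cols 0 c) = pvZ cols := by
  have h : ∀ c ∈ List.range (cols + 2), pvDRb grid cols 0 c = (fun _ => (0 : Int)) c :=
    fun c _ => by simp [pvDRb]
  rw [List.map_congr_left h]
  simp [pvZ, List.map_const']

-- one functional row step maps closed-form row k to closed-form row k+1
theorem rowL_closed (grid : List (List Int)) (cols k : Nat)
    (ha : cols ≤ (grid.getD k []).length) :
    pvRowL cols ((List.range (cols + 2)).map (fun c => pvDLb grid cols k c)) (grid.getD k [])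
      = (List.range (cols + 2)).map (fun c => pvDLb grid cols (k + 1) c) := by
  have hz : List.zipWith (· + · : Int → Int → Int)
      ((List.range (cols + 2)).map (fun c => pvDLb grid cols k c))
      ((grid.getD k []).take cols)
      = (List.range cols).map (fun j => pvDLb grid cols (k + 1) (j + 1)) := by
    apply List.ext_getElem
    · simp only [List.getD_eq_getElem?_getD] at ha
      simp [List.length_zipWith]; omega
    · intro j h1 h2
      have hj : j < cols := by simpa using h2
      simp only [List.getElem_zipWith, List.getElem_map, List.getElem_range, List.getElem_take]
      rw [recL grid cols k j hj, List.getD_eq_getElem _ 0 (by omega)]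
  have hsplit : List.range (cols + 2)
      = 0 :: ((List.range cols).map (fun j => j + 1) ++ [cols + 1]) := by
    rw [show cols + 2 = (cols + 1) + 1 by rfl, List.range_succ, List.range_succ_eq_map]
    simp
  rw [pvRowL, hz, hsplit]
  simp only [List.map_cons, List.map_append, List.map_map, List.map_cons, List.map_nil]
  have h0 : pvDLb grid cols (k + 1) 0 = 0 := by simp [pvDLb]
  have hlast : pvDLb grid cols (k + 1) (cols + 1) = 0 := by simp [pvDLb]
  rw [h0, hlast]
  rfl

theorem rowR_closed (grid : List (List Int)) (cols k : Nat)
    (ha : cols ≤ (grid.getD k []).length) :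
    pvRowR cols ((List.range (cols + 2)).map (fun c => pvDRb grid cols k c)) (grid.getD k [])
      = (List.range (cols + 2)).map (fun c => pvDRb grid cols (k + 1) c) := by
  have hz : List.zipWith (· + · : Int → Int → Int)
      (((List.range (cols + 2)).map (fun c => pvDRb grid cols k c)).drop 2)
      ((grid.getD k []).take cols)
      = (List.range cols).map (fun j => pvDRb grid cols (k + 1) (j + 1)) := by
    apply List.ext_getElem
    · simp only [List.getD_eq_getElem?_getD] at ha
      simp [List.length_zipWith]; omega
    · intro j h1 h2
      have hj : j < cols := by simpa using h2
      simp only [List.getElem_zipWith, List.getElem_drop, List.getElem_map, List.getElem_range,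
        List.getElem_take]
      rw [recR grid cols k j hj, List.getD_eq_getElem _ 0 (by omega)]
      congr 2
      omega
  have hsplit : List.range (cols + 2)
      = 0 :: ((List.range cols).map (fun j => j + 1) ++ [cols + 1]) := by
    rw [show cols + 2 = (cols + 1) + 1 by rfl, List.range_succ, List.range_succ_eq_map]
    simp
  rw [pvRowR, hz, hsplit]
  simp only [List.map_cons, List.map_append, List.map_map, List.map_cons, List.map_nil]
  have h0 : pvDRb grid cols (k + 1) 0 = 0 := by simp [pvDRb]
  have hlast : pvDRb grid cols (k + 1) (cols + 1) = 0 := by simp [pvDRb]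
  rw [h0, hlast]
  rfl

-- the scanl rows are exactly the closed-form rows
theorem scanl_closed_L (grid : List (List Int))
    (hrow : ∀ row ∈ grid, grid.headI.length ≤ row.length) :
    ∀ k, k ≤ grid.length →
      List.scanl (pvRowL grid.headI.length) (pvZ grid.headI.length) (grid.take k)
      = (List.range (k + 1)).map
          (fun r => (List.range (grid.headI.length + 2)).map
            (fun c => pvDLb grid grid.headI.length r c)) := by
  intro k
  induction k with
  | zero => intro _; simp [List.scanl, closed_row_zero_L]
  | succ k ih =>
    intro hk
    have hkc : k < grid.length := by omega
    have htk : (grid.take k).length = k := by simp [List.length_take]; omega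
    have hach : grid.headI.length ≤ (grid.getD k []).length := by
      rw [List.getD_eq_getElem _ _ hkc]; exact hrow _ (List.getElem_mem hkc)
    have htake : grid.take (k + 1) = grid.take k ++ [grid[k]'hkc] :=
      (List.take_append_getElem hkc).symm
    have hfold : (grid.take k).foldl (pvRowL grid.headI.length) (pvZ grid.headI.length)
        = (List.range (grid.headI.length + 2)).map
            (fun c => pvDLb grid grid.headI.length k c) := by
      have h := scanl_getD_last (pvRowL grid.headI.length) (grid.take k) (pvZ grid.headI.length) []
      rw [htk, ih (by omega)] at h
      rw [← h, List.getD_eq_getElem _ _ (by simp)]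
      simp
    rw [htake, scanl_append_singleton, ih (by omega), hfold,
      show grid[k]'hkc = grid.getD k [] from (List.getD_eq_getElem _ _ hkc).symm,
      rowL_closed grid grid.headI.length k hach]
    rw [List.range_succ (n := k + 1), List.map_append]
    rfl

theorem scanl_closed_R (grid : List (List Int))
    (hrow : ∀ row ∈ grid, grid.headI.length ≤ row.length) :
    ∀ k, k ≤ grid.length →
      List.scanl (pvRowR grid.headI.length) (pvZ grid.headI.length) (grid.take k)
      = (List.range (k + 1)).map
          (fun r => (List.range (grid.headI.length + 2)).map
            (fun c => pvDRb grid grid.headI.length r c)) := by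
  intro k
  induction k with
  | zero => intro _; simp [List.scanl, closed_row_zero_R]
  | succ k ih =>
    intro hk
    have hkc : k < grid.length := by omega
    have htk : (grid.take k).length = k := by simp [List.length_take]; omega
    have hach : grid.headI.length ≤ (grid.getD k []).length := by
      rw [List.getD_eq_getElem _ _ hkc]; exact hrow _ (List.getElem_mem hkc)
    have htake : grid.take (k + 1) = grid.take k ++ [grid[k]'hkc] :=
      (List.take_append_getElem hkc).symm
    have hfold : (grid.take k).foldl (pvRowR grid.headI.length) (pvZ grid.headI.length)
        = (List.range (grid.headI.length + 2)).map
            (fun c => pvDRb grid grid.headI.length k c) := by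
      have h := scanl_getD_last (pvRowR grid.headI.length) (grid.take k) (pvZ grid.headI.length) []
      rw [htk, ih (by omega)] at h
      rw [← h, List.getD_eq_getElem _ _ (by simp)]
      simp
    rw [htake, scanl_append_singleton, ih (by omega), hfold,
      show grid[k]'hkc = grid.getD k [] from (List.getD_eq_getElem _ _ hkc).symm,
      rowR_closed grid grid.headI.length k hach]
    rw [List.range_succ (n := k + 1), List.map_append]
    rfl

-- ===== VERDICT (by name: the statement is the Claim_ definition above) =====
theorem build_diagonal_prefix_py_spec : Claim_equal_build_diagonal_prefix_py := by
  intro grid _ hpre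
  unfold Spec_build_diagonal_prefix_py
  obtain ⟨-, hrow⟩ := hpre
  have hA0 : build_diagonal_prefix_py grid
      = (List.range' 1 grid.length).foldl
          (fun st r => (List.range' 1 grid.headI.length).foldl (pvStepA grid r) st)
          (List.replicate (grid.length + 1) (pvZ grid.headI.length),
           List.replicate (grid.length + 1) (pvZ grid.headI.length)) := rfl
  rw [hA0, outer_inv grid hrow grid.length le_rfl,
    scanl_closed_L grid hrow grid.length le_rfl,
    scanl_closed_R grid hrow grid.length le_rfl]
  simp only [Nat.sub_self, List.replicate_zero, List.append_nil]
  rfl
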